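-- pv_equiv track=rewrite | github.com/szelesteya/traveling-tournament-problem-group-project | simulated_annealing.py | round_is_valid
-- ===== SOURCE A (Python) =====
-- def round_is_valid(round_matches):
--     # ensure teams in that round are unique (no team plays twice in same round) and no self matches
--     seen = set()
--     for h, a in round_matches:
--         if h == a:
--             return False
--         if h in seen or a in seen:
--             return False
--         seen.add(h)
--         seen.add(a)
--     return True
-- ===== SOURCE B (Python) =====
-- def round_is_valid(round_matches):
--     # gather all teams; a round is valid iff no self-match and all teams distinct
--     teams = []
--     for h, a in round_matches:
--         if h == a:
--             return False
--         teams.append(h)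
--         teams.append(a)
--     return len(teams) == len(set(teams))
-- ===== Notes on version B (the rewrite author's own statement) =====
-- stated objective: simpler
-- what changed: Replaces the incremental seen-set membership checks and early duplicate exit with one pass that only rejects self-matches while gathering all teams into a flat list, then decides uniqueness by a single cardinality comparison len(teams) == len(set(teams)).
import Mathlib
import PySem

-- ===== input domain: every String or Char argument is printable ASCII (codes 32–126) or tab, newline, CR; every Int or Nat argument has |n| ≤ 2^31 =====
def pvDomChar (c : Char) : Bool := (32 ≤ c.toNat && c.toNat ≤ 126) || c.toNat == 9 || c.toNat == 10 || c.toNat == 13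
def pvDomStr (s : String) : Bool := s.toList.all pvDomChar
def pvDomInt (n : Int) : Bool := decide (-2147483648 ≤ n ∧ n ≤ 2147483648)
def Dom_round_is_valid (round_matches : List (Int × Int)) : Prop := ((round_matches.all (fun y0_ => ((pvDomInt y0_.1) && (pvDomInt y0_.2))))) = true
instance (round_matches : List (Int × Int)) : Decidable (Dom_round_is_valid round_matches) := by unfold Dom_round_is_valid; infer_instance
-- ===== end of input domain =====

-- B replaces A's incremental seen-set early-exit duplicate check by gathering all teams
-- into a flat list and comparing its length with its set's size (objective: simpler).

-- ===== PORT A =====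
-- A's loop: early False on self-match or a team already seen, else add both to 'seen'.
def pvALoop (rm : List (Int × Int)) (seen : PySem.Set Int) : Bool :=
  match rm with
  | [] => true
  | (h, a) :: rest =>
    if h == a then false
    else if PySem.Set.contains seen h || PySem.Set.contains seen a then false
    else pvALoop rest (PySem.Set.add (PySem.Set.add seen h) a)

def round_is_valid (round_matches : List (Int × Int)) : Bool :=
  pvALoop round_matches PySem.Set.empty

-- ===== PORT B =====
-- B's loop: early False (none) on self-match, else append both teams to the flat list.
def pvBCollect (rm : List (Int × Int)) (teams : List Int) : Option (List Int) :=
  match rm with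
  | [] => some teams
  | (h, a) :: rest =>
    if h == a then none
    else pvBCollect rest (teams ++ [h, a])

def round_is_valid_alt (round_matches : List (Int × Int)) : Bool :=
  match pvBCollect round_matches [] with
  | none => false
  | some teams => teams.length == (PySem.Set.ofList teams).length

-- ===== PRECONDITION & SPEC =====
def Spec_round_is_valid (round_matches : List (Int × Int)) (out : Bool) : Prop := out = round_is_valid_alt round_matches
instance (round_matches : List (Int × Int)) (out : Bool) : Decidable (Spec_round_is_valid round_matches out) := by unfold Spec_round_is_valid; infer_instance

-- ===== CLAIM (what is proved, stated in full; the proofs are below) =====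
def Claim_equal_round_is_valid : Prop := ∀ (round_matches : List (Int × Int)), Dom_round_is_valid round_matches → Spec_round_is_valid round_matches (round_is_valid round_matches)

-- ===== LEMMAS AND PROOFS =====

theorem contains_ofList (acc : List Int) (x : Int) :
    PySem.Set.contains (PySem.Set.ofList acc) x = true ↔ x ∈ acc := by
  rw [show (PySem.Set.contains (PySem.Set.ofList acc) x = true)
        ↔ x ∈ PySem.Set.ofList acc from by simp [PySem.Set.contains]]
  exact PySem.Set.mem_ofList acc x

theorem ofList_append_singleton (ts : List Int) (x : Int) :
    PySem.Set.ofList (ts ++ [x]) = PySem.Set.add (PySem.Set.ofList ts) x := by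
  simp [PySem.Set.ofList_eq_foldl, List.foldl_append]

theorem len_ofList_le (ts : List Int) :
    (PySem.Set.ofList ts).length ≤ ts.length := by
  induction ts using List.reverseRecOn with
  | nil => simp [PySem.Set.ofList]
  | append_singleton ts x ih =>
    rw [ofList_append_singleton]
    unfold PySem.Set.add
    split <;> simp <;> omega

theorem len_ofList_eq_iff (ts : List Int) :
    (PySem.Set.ofList ts).length = ts.length ↔ ts.Nodup := by
  induction ts using List.reverseRecOn with
  | nil => simp [PySem.Set.ofList]
  | append_singleton ts x ih =>
    rw [ofList_append_singleton, List.nodup_append]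
    unfold PySem.Set.add
    split
    · rename_i hc
      have hx : x ∈ ts := (contains_ofList ts x).mp hc
      have := len_ofList_le ts
      simp only [List.length_append, List.length_singleton]
      constructor
      · intro h; omega
      · rintro ⟨-, -, hdis⟩
        exact absurd rfl (hdis x hx x (List.mem_singleton_self x))
    · rename_i hc
      have hx : x ∉ ts := fun hmem => hc ((contains_ofList ts x).mpr hmem)
      simp only [List.length_append, List.length_singleton]
      constructor
      · intro h
        refine ⟨ih.mp (by omega), List.nodup_singleton x, ?_⟩
        intro b hb c hc2
        rw [List.mem_singleton] at hc2
        subst hc2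
        exact fun hbc => hx (hbc ▸ hb)
      · rintro ⟨hn, -, -⟩
        have := ih.mpr hn
        omega

theorem bcollect_prefix (rm : List (Int × Int)) (acc ts : List Int)
    (h : pvBCollect rm acc = some ts) : acc <+: ts := by
  induction rm generalizing acc with
  | nil => simp [pvBCollect] at h; simp [h]
  | cons p rest ih =>
    obtain ⟨x, y⟩ := p
    unfold pvBCollect at h
    split at h
    · exact absurd h (by simp)
    · exact List.IsPrefix.trans (List.prefix_append acc [x, y]) (ih _ h)

theorem bcollect_not_nodup (rm : List (Int × Int)) (acc : List Int)
    (hnd : ¬ acc.Nodup) :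
    (match pvBCollect rm acc with
     | none => false
     | some ts => (ts.length == (PySem.Set.ofList ts).length)) = false := by
  cases hcoll : pvBCollect rm acc with
  | none => simp
  | some ts =>
    have hpre := bcollect_prefix rm acc ts hcoll
    have hts : ¬ ts.Nodup := fun h => hnd (h.sublist hpre.sublist)
    simp only []
    rw [beq_eq_false_iff_ne]
    intro h
    exact hts ((len_ofList_eq_iff ts).mp h.symm)

theorem loop_eq (rm : List (Int × Int)) (acc : List Int) (hnd : acc.Nodup) :
    pvALoop rm (PySem.Set.ofList acc) =
      (match pvBCollect rm acc with
       | none => false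
       | some ts => (ts.length == (PySem.Set.ofList ts).length)) := by
  induction rm generalizing acc with
  | nil =>
    simp [pvALoop, pvBCollect, ((len_ofList_eq_iff acc).mpr hnd).symm]
  | cons p rest ih =>
    obtain ⟨h, a⟩ := p
    unfold pvALoop pvBCollect
    by_cases hsa : h == a
    · simp [hsa]
    · simp only [hsa, if_false, Bool.false_eq_true]
      by_cases hh : h ∈ acc
      · rw [if_pos (by simp [PySem.Set.contains]; exact Or.inl hh)]
        refine (bcollect_not_nodup rest (acc ++ [h, a]) ?_).symm
        intro hnodup
        rw [List.nodup_append] at hnodup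
        exact absurd rfl (hnodup.2.2 h hh h (by simp))
      · by_cases ha : a ∈ acc
        · rw [if_pos (by simp [PySem.Set.contains]; exact Or.inr ha)]
          refine (bcollect_not_nodup rest (acc ++ [h, a]) ?_).symm
          intro hnodup
          rw [List.nodup_append] at hnodup
          exact absurd rfl (hnodup.2.2 a ha a (by simp))
        · have hch : ¬ PySem.Set.contains (PySem.Set.ofList acc) h = true :=
            fun hc => hh ((contains_ofList acc h).mp hc)
          have hca : ¬ PySem.Set.contains (PySem.Set.ofList acc) a = true :=
            fun hc => ha ((contains_ofList acc a).mp hc)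
          rw [if_neg (by simp [PySem.Set.contains]; exact ⟨hh, ha⟩)]
          have hset : PySem.Set.add (PySem.Set.add (PySem.Set.ofList acc) h) a
              = PySem.Set.ofList (acc ++ [h, a]) := by
            have heq : acc ++ [h, a] = (acc ++ [h]) ++ [a] := by simp
            rw [heq, ofList_append_singleton, ofList_append_singleton]
          have hnd2 : (acc ++ [h, a]).Nodup := by
            rw [List.nodup_append]
            refine ⟨hnd, ?_, ?_⟩
            · have : h ≠ a := fun he => hsa (by simp [he])
              simp [this]
            · intro b hb c hc2
              simp only [List.mem_cons, List.not_mem_nil, or_false, List.mem_singleton] at hc2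
              rcases hc2 with rfl | rfl
              · exact fun hbc => hh (hbc ▸ hb)
              · exact fun hbc => ha (hbc ▸ hb)
          rw [hset]
          exact ih (acc ++ [h, a]) hnd2

-- ===== VERDICT (by name: the statement is the Claim_ definition above) =====
theorem round_is_valid_spec : Claim_equal_round_is_valid := by
  intro rm _
  unfold Spec_round_is_valid round_is_valid round_is_valid_alt
  have := loop_eq rm [] (by simp)
  simpa [PySem.Set.ofList, PySem.Set.empty] using this
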